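-- pv_equiv track=rewrite | github.com/ramzpat/leetcode_practice | medium/2128_remove-all-ones-with-row-and-column-flips.py | removeOnes
-- ===== SOURCE A (Python) =====
-- from typing import List
--
-- def removeOnes(grid: List[List[int]]) -> bool:
--   m = len(grid)
--   n = len(grid[0])
--   row_orig = grid[0]
--   row_flip = [1 - x for x in grid[0]]
--
--   for row in range(1, m):
--     if grid[row] != row_orig and grid[row] != row_flip:
--       return False
--   return True
-- ===== SOURCE B (Python) =====
-- from typing import List
--
-- def removeOnes(grid: List[List[int]]) -> bool:
--   first = grid[0]
--   n = len(first)
--   rest = grid[1:]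
--   for r in rest:
--     if len(r) != n:
--       return False
--   # column-major scan: per-row (equal-so-far, complement-so-far) status flags
--   status = [(True, True) for _ in rest]
--   for j in range(n):
--     f = first[j]
--     status = [(e and r[j] == f, c and r[j] == 1 - f)
--               for (e, c), r in zip(status, rest)]
--   return all(e or c for e, c in status)
-- ===== Notes on version B (the rewrite author's own statement) =====
-- stated objective: alternative
-- what changed: B replaces A's row-major whole-list comparisons against a precomputed flipped row by a column-major scan that maintains per-row (equal-so-far, complement-so-far) boolean status flags updated column by column.
import Mathlib
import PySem

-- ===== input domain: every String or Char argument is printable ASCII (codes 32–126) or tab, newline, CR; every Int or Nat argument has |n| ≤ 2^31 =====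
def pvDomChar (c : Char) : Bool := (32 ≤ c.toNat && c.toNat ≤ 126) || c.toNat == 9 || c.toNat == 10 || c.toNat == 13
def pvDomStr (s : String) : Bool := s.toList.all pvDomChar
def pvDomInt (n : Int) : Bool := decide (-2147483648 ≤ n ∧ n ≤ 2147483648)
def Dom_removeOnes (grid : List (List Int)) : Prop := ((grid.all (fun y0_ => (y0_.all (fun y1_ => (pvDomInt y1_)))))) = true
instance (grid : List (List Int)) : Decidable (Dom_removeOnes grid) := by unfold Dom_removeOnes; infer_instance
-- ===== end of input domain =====

-- B replaces A's row-major whole-list comparisons against a precomputed flipped row by a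
-- column-major scan maintaining per-row (equal-so-far, complement-so-far) status flags (alternative, same cost).


-- ===== PORT A =====
-- A: row_orig = grid[0], row_flip = [1-x for x in grid[0]]; every later row must equal one of them.
def removeOnes (grid : List (List Int)) : Bool :=
  match grid with
  | [] => false  -- unreachable: Pre_ excludes [] (Python A raises IndexError on grid[0])
  | rowOrig :: rest =>
    let rowFlip := rowOrig.map (fun x => 1 - x)
    rest.all (fun row => row == rowOrig || row == rowFlip)

-- ===== PORT B =====
-- B: check lengths, then scan COLUMNS, updating per-row (equal-so-far, complement-so-far) flags.
def removeOnes_alt (grid : List (List Int)) : Bool :=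
  match grid with
  | [] => false  -- unreachable: Pre_ excludes [] (Python B raises IndexError on grid[0])
  | first :: rest =>
    if rest.all (fun r => r.length == first.length) then
      let st := (List.range first.length).foldl
        (fun st j => List.zipWith
          (fun (p : Bool × Bool) (r : List Int) =>
            (p.1 && (r.getD j 0 == first.getD j 0),
             p.2 && (r.getD j 0 == 1 - first.getD j 0))) st rest)
        (rest.map (fun _ => (true, true)))
      st.all (fun p => p.1 || p.2)
    else false

-- ===== PRECONDITION & SPEC =====
-- Pre_ excludes only the empty grid, on which Python A (and B) raise IndexError at grid[0].
def Pre_removeOnes (grid : List (List Int)) : Prop := grid ≠ []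
instance (grid : List (List Int)) : Decidable (Pre_removeOnes grid) := by unfold Pre_removeOnes; infer_instance
def pvWitness_removeOnes : List (List Int) := [[0, 1], [1, 0]]

def Spec_removeOnes (grid : List (List Int)) (out : Bool) : Prop := out = removeOnes_alt grid
instance (grid : List (List Int)) (out : Bool) : Decidable (Spec_removeOnes grid out) := by unfold Spec_removeOnes; infer_instance

-- ===== CLAIM (what is proved, stated in full; the proofs are below) =====
def Claim_equal_removeOnes : Prop := ∀ (grid : List (List Int)), Dom_removeOnes grid → Pre_removeOnes grid → Spec_removeOnes grid (removeOnes grid)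

-- ===== LEMMAS AND PROOFS =====

theorem zipWith_map_left_same {α β : Type} (l : List α) (g : α → β) (f : β → α → β) :
    List.zipWith f (l.map g) l = l.map (fun x => f (g x) x) := by
  induction l with
  | nil => rfl
  | cons a l ih => simp [ih]

-- the column fold computes, per row, the conjunction of the per-column tests
theorem fold_status (first : List Int) (rest : List (List Int)) (n : ℕ) :
    (List.range n).foldl
      (fun st j => List.zipWith
        (fun (p : Bool × Bool) (r : List Int) =>
          (p.1 && (r.getD j 0 == first.getD j 0),
           p.2 && (r.getD j 0 == 1 - first.getD j 0))) st rest)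
      (rest.map (fun _ => (true, true)))
    = rest.map (fun r =>
        ((List.range n).all (fun j => r.getD j 0 == first.getD j 0),
         (List.range n).all (fun j => r.getD j 0 == 1 - first.getD j 0))) := by
  induction n with
  | zero => simp
  | succ n ih =>
    rw [List.range_succ, List.foldl_append, ih, List.foldl_cons, List.foldl_nil,
      zipWith_map_left_same]
    simp [List.all_append, Bool.and_comm]

-- whole-list equality as an all-columns test, given equal lengths
theorem eq_iff_cols (r f : List Int) (h : r.length = f.length) :
    (r = f) ↔ ∀ j < f.length, r.getD j 0 = f.getD j 0 := by
  constructor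
  · rintro rfl j hj; rfl
  · intro hall
    apply List.ext_getElem h
    intro i h1 h2
    have := hall i h2
    rwa [List.getD_eq_getElem _ _ h1, List.getD_eq_getElem _ _ h2] at this

theorem flip_iff_cols (r f : List Int) (h : r.length = f.length) :
    (r = f.map (fun x => 1 - x)) ↔ ∀ j < f.length, r.getD j 0 = 1 - f.getD j 0 := by
  rw [eq_iff_cols r (f.map (fun x => 1 - x)) (by simpa using h)]
  simp only [List.length_map]
  refine forall_congr' (fun j => imp_congr_right (fun hj => ?_))
  rw [List.getD_eq_getElem (f.map (fun x => 1 - x)) _ (by simpa using hj), List.getElem_map,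
    ← List.getD_eq_getElem f _ hj]

-- per-row: A's test equals B's accumulated flags, given equal lengths
theorem row_test (first r : List Int) (h : r.length = first.length) :
    (r == first || r == first.map (fun x => 1 - x)) =
    ((List.range first.length).all (fun j => r.getD j 0 == first.getD j 0) ||
     (List.range first.length).all (fun j => r.getD j 0 == 1 - first.getD j 0)) := by
  congr 1
  · rcases Bool.eq_false_or_eq_true ((List.range first.length).all
      (fun j => r.getD j 0 == first.getD j 0)) with hb | hb
    · rw [hb, beq_iff_eq]
      rw [List.all_eq_true] at hb
      exact (eq_iff_cols r first h).mpr (fun j hj => by simpa using hb j (List.mem_range.mpr hj))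
    · rw [hb, beq_eq_false_iff_ne]
      rw [List.all_eq_false] at hb
      obtain ⟨j, hj, hne⟩ := hb
      simp only [List.mem_range] at hj
      intro hr
      exact hne (beq_iff_eq.mpr ((eq_iff_cols r first h).mp hr j hj))
  · rcases Bool.eq_false_or_eq_true ((List.range first.length).all
      (fun j => r.getD j 0 == 1 - first.getD j 0)) with hb | hb
    · rw [hb, beq_iff_eq]
      rw [List.all_eq_true] at hb
      exact (flip_iff_cols r first h).mpr
        (fun j hj => by simpa using hb j (List.mem_range.mpr hj))
    · rw [hb, beq_eq_false_iff_ne]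
      rw [List.all_eq_false] at hb
      obtain ⟨j, hj, hne⟩ := hb
      simp only [List.mem_range] at hj
      intro hr
      exact hne (beq_iff_eq.mpr ((flip_iff_cols r first h).mp hr j hj))

theorem all_congr_mem {α : Type} (l : List α) (p q : α → Bool)
    (h : ∀ x ∈ l, p x = q x) : l.all p = l.all q := by
  induction l with
  | nil => rfl
  | cons a l ih => simp only [List.all_cons, h a (List.mem_cons_self), ih (fun x hx => h x (List.mem_cons_of_mem a hx))]

-- ===== VERDICT (by name: the statement is the Claim_ definition above) =====
theorem removeOnes_spec : Claim_equal_removeOnes := by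
  intro grid _ hpre
  unfold Spec_removeOnes removeOnes removeOnes_alt
  cases grid with
  | nil => exact absurd rfl hpre
  | cons first rest =>
    simp only
    by_cases hlen : rest.all (fun r => r.length == first.length) = true
    · rw [if_pos hlen, fold_status, List.all_map]
      rw [List.all_eq_true] at hlen
      apply all_congr_mem
      intro r hr
      exact row_test first r (by simpa using hlen r hr)
    · rw [if_neg hlen]
      rw [Bool.not_eq_true, List.all_eq_false] at hlen
      obtain ⟨r, hr, hne⟩ := hlen
      rw [Bool.not_eq_true, beq_eq_false_iff_ne] at hne
      apply List.all_eq_false.mpr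
      refine ⟨r, hr, ?_⟩
      rw [Bool.not_eq_true, Bool.or_eq_false_iff]
      constructor
      · rw [beq_eq_false_iff_ne]; intro h; exact hne (by simp [h])
      · rw [beq_eq_false_iff_ne]; intro h; exact hne (by simp [h])
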